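-- pv_equiv track=rewrite | github.com/SvetlanaBogdanova/PythonCourseProject | Lesson 3/Task 6_7.py | filter_eng
-- ===== SOURCE A (Python) =====
-- def int_func(s):
--     return s.title()
--
-- def filter_eng(s):
--     new_s = []
--     # alph = 'abcdefghijklmnopqrstuvwxyz'
--     for word in s.split(' '):
--         for letter in word:
--             # if letter not in alph:
--             if letter < 'a' or letter > 'z':
--                 break
--         else:
--             new_s.append(word)
--     return int_func(' '.join(new_s))
-- ===== SOURCE B (Python) =====
-- def filter_eng(s):
--     # One fused character-level pass (state machine: current buffer + validity flag)
--     # instead of split / per-word scan / join / title staged passes.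
--     res = []
--     buf = ''
--     ok = True
--     for c in s + ' ':
--         if c == ' ':
--             if ok:
--                 res.append(buf.capitalize())
--             buf, ok = '', True
--         else:
--             buf += c
--             ok = ok and 'a' <= c <= 'z'
--     return ' '.join(res)
-- ===== Notes on version B (the rewrite author's own statement) =====
-- stated objective: alternative
-- what changed: B replaces A's staged pipeline (split into words, per-word break/for-else scan, join, whole-string .title()) by one fused character-level state machine over the input with a trailing separator appended, maintaining a current-word buffer and a validity flag and flushing an already-capitalized word at each separator; no split, no inner word loop and no title pass exist.
import Mathlib
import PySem

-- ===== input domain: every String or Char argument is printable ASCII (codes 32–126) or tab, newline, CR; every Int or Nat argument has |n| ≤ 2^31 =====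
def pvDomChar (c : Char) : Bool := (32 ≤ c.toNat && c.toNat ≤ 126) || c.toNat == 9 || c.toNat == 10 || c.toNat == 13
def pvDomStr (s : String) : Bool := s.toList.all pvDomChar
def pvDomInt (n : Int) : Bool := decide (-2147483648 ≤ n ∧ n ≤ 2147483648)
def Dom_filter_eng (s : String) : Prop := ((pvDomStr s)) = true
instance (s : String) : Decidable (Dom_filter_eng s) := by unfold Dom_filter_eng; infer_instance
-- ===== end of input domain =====

-- B replaces A's staged split / per-word scan / join / title pipeline by one fused
-- character-level state machine (buffer + validity flag) over s + ' ' (alternative, same cost).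

-- ===== PORT A =====
-- inner 'for letter in word: if letter < 'a' or letter > 'z': break / else: append'
def pvCheckA : List Char → Bool
  | [] => true
  | c :: r => if c < 'a' ∨ 'z' < c then false else pvCheckA r

-- str.title(), exact on ASCII: an alpha char after a non-alpha is uppercased, after an alpha lowercased
def pvTitleGo : Bool → List Char → List Char
  | _, [] => []
  | prev, c :: r =>
    if PySem.Chars.isalpha c then
      (if prev then PySem.Chars.lowerChar c else PySem.Chars.upperChar c) :: pvTitleGo true r
    else c :: pvTitleGo false r

-- int_func(s) = s.title()
def pvIntFunc (cs : List Char) : List Char := pvTitleGo false cs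

def filter_eng (s : String) : String :=
  let new_s := (PySem.Chars.splitOn s.toList [' ']).foldl
      (fun acc w => if pvCheckA w then acc ++ [w] else acc) []
  String.mk (pvIntFunc (PySem.Chars.join [' '] new_s))

-- ===== PORT B =====
-- buf.capitalize(), exact on ASCII: first char uppercased, the rest lowercased
def pvCapitalize : List Char → List Char
  | [] => []
  | c :: r => PySem.Chars.upperChar c :: PySem.Chars.lower r

-- 'for c in s + " ": if c == " ": flush buf if ok / else: extend buf, update ok'
def pvBLoop : List Char → List Char → Bool → List (List Char) → List (List Char)
  | [], _, _, res => res
  | c :: r, buf, ok, res =>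
      if c = ' ' then
        pvBLoop r [] true (if ok then res ++ [pvCapitalize buf] else res)
      else
        pvBLoop r (buf ++ [c]) (ok && (decide ('a' ≤ c) && decide (c ≤ 'z'))) res

def filter_eng_alt (s : String) : String :=
  String.mk (PySem.Chars.join [' '] (pvBLoop (s.toList ++ [' ']) [] true []))

-- ===== PRECONDITION & SPEC =====
def Spec_filter_eng (s : String) (out : String) : Prop := out = filter_eng_alt s
instance (s : String) (out : String) : Decidable (Spec_filter_eng s out) := by unfold Spec_filter_eng; infer_instance

-- ===== CLAIM (what is proved, stated in full; the proofs are below) =====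
def Claim_equal_filter_eng : Prop := ∀ (s : String), Dom_filter_eng s → Spec_filter_eng s (filter_eng s)

-- ===== LEMMAS AND PROOFS =====

def pvLowerPred (c : Char) : Bool := decide ('a' ≤ c) && decide (c ≤ 'z')

-- (first piece, remaining pieces) of split on a single space, proof-side characterization
def pvSplit1 : List Char → List Char × List (List Char)
  | [] => ([], [])
  | c :: r =>
      let p := pvSplit1 r
      if c = ' ' then ([], p.1 :: p.2) else (c :: p.1, p.2)

def pvProc (ws : List (List Char)) : List (List Char) :=
  (ws.filter (fun w => w.all pvLowerPred)).map pvCapitalize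

theorem pvCheckA_eq_all (w : List Char) : pvCheckA w = w.all pvLowerPred := by
  induction w with
  | nil => rfl
  | cons c r ih =>
      simp only [pvCheckA, List.all_cons, pvLowerPred, ih]
      by_cases h : c < 'a' ∨ 'z' < c
      · simp only [if_pos h]
        rcases h with h | h <;> simp [not_le.mpr h]
      · push_neg at h
        simp [h.1, h.2]

theorem pvLower_isalpha {c : Char} (h : pvLowerPred c = true) :
    PySem.Chars.isalpha c = true := by
  have hl : PySem.Chars.islower c = true := h
  simp [PySem.Chars.isalpha, hl]

theorem pvLower_lowerChar {c : Char} (h : pvLowerPred c = true) :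
    PySem.Chars.lowerChar c = c := by
  simp only [pvLowerPred, Bool.and_eq_true, decide_eq_true_eq] at h
  have hu : PySem.Chars.isupper c = false := by
    have hz : ¬ c ≤ 'Z' := fun hle => absurd (le_trans h.1 hle) (by decide)
    simp [PySem.Chars.isupper, hz]
  simp [PySem.Chars.lowerChar, hu]

theorem pvLower_fix {r : List Char} (h : r.all pvLowerPred = true) :
    PySem.Chars.lower r = r := by
  induction r with
  | nil => rfl
  | cons c rs ih =>
      simp only [List.all_cons, Bool.and_eq_true] at h
      simp only [PySem.Chars.lower, List.map_cons, pvLower_lowerChar h.1]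
      exact congrArg _ (ih h.2)

theorem pvCapitalize_cons_of {c : Char} {r : List Char} (h : r.all pvLowerPred = true) :
    pvCapitalize (c :: r) = PySem.Chars.upperChar c :: r := by
  simp [pvCapitalize, pvLower_fix h]

-- after an alpha char, a fully-lowercase run passes through title unchanged
theorem pvTitleGo_true (r tail : List Char) (h : r.all pvLowerPred = true) :
    pvTitleGo true (r ++ tail) = r ++ pvTitleGo true tail := by
  induction r with
  | nil => rfl
  | cons c rs ih =>
      simp only [List.all_cons, Bool.and_eq_true] at h
      simp only [List.cons_append, pvTitleGo, if_pos (pvLower_isalpha h.1), if_true,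
        pvLower_lowerChar h.1, ih h.2]

-- the A-side bridge: titling the join of all-lowercase words = joining the capitalized words
theorem pvTitle_join (ws : List (List Char))
    (h : ∀ w ∈ ws, w.all pvLowerPred = true) :
    pvTitleGo false (PySem.Chars.join [' '] ws) = PySem.Chars.join [' '] (ws.map pvCapitalize) := by
  induction ws with
  | nil => rfl
  | cons w ws ih =>
      have hw : w.all pvLowerPred = true := h w (List.mem_cons_self ..)
      have hws : ∀ v ∈ ws, v.all pvLowerPred = true := fun v hv => h v (List.mem_cons_of_mem _ hv)
      cases ws with
      | nil =>
          simp only [List.map, PySem.Chars.join_singleton]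
          cases w with
          | nil => rfl
          | cons c r =>
              simp only [List.all_cons, Bool.and_eq_true] at hw
              have hr := pvTitleGo_true r [] hw.2
              simp only [pvTitleGo, List.append_nil] at hr
              simp only [pvTitleGo, if_pos (pvLower_isalpha hw.1), if_neg (Bool.false_ne_true),
                pvCapitalize_cons_of hw.2, hr]
      | cons v vs =>
          rw [PySem.Chars.join_cons_cons]
          have hrhs : PySem.Chars.join [' '] (List.map pvCapitalize (w :: v :: vs))
              = pvCapitalize w ++ [' '] ++ PySem.Chars.join [' '] (List.map pvCapitalize (v :: vs)) := by
            simp only [List.map_cons]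
            rw [PySem.Chars.join_cons_cons]
          rw [hrhs, List.append_assoc, List.append_assoc]
          have hna : PySem.Chars.isalpha ' ' = false := by decide
          have hsp : pvTitleGo true (' ' :: PySem.Chars.join [' '] (v :: vs))
              = ' ' :: pvTitleGo false (PySem.Chars.join [' '] (v :: vs)) := by
            simp [pvTitleGo, hna]
          cases w with
          | nil =>
              simp only [List.nil_append, pvCapitalize]
              simp [pvTitleGo, hna, ih hws]
          | cons c r =>
              simp only [List.all_cons, Bool.and_eq_true] at hw
              simp only [pvCapitalize_cons_of hw.2, List.cons_append, List.nil_append]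
              have hstep : pvTitleGo false (c :: (r ++ ' ' :: PySem.Chars.join [' '] (v :: vs)))
                  = PySem.Chars.upperChar c ::
                      pvTitleGo true (r ++ ' ' :: PySem.Chars.join [' '] (v :: vs)) := by
                simp [pvTitleGo, pvLower_isalpha hw.1]
              rw [hstep, pvTitleGo_true r _ hw.2, hsp, ih hws]

-- splitOn with a single-space separator computes pvSplit1
theorem pvSplitOn_go_eq (l : List Char) : ∀ (fuel : ℕ) (cur : List Char) (acc : List (List Char)),
    l.length ≤ fuel →
    PySem.Chars.splitOn.go [' '] fuel l cur acc
      = acc.reverse ++ ((cur.reverse ++ (pvSplit1 l).1) :: (pvSplit1 l).2) := by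
  induction l with
  | nil =>
      intro fuel cur acc _
      cases fuel <;> simp [PySem.Chars.splitOn.go, pvSplit1]
  | cons c r ih =>
      intro fuel cur acc hf
      cases fuel with
      | zero => simp at hf
      | succ f =>
          have hf' : r.length ≤ f := by simpa using hf
          by_cases hc : c = ' '
          · subst hc
            have hpre : List.isPrefixOf [' '] (' ' :: r) = true := by simp [List.isPrefixOf]
            simp only [PySem.Chars.splitOn.go, hpre, if_true, List.length_cons, List.length_nil,
              List.drop_succ_cons, List.drop_zero]
            rw [ih f [] (cur.reverse :: acc) hf']
            simp [pvSplit1]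
          · have hpre : List.isPrefixOf [' '] (c :: r) = false := by
              simp [List.isPrefixOf, Ne.symm hc]
            simp only [PySem.Chars.splitOn.go, hpre, Bool.false_eq_true, if_false]
            rw [ih f (c :: cur) acc hf']
            simp [pvSplit1, hc]

theorem pvSplitOn_eq (l : List Char) :
    PySem.Chars.splitOn l [' '] = (pvSplit1 l).1 :: (pvSplit1 l).2 := by
  unfold PySem.Chars.splitOn
  rw [pvSplitOn_go_eq l (l.length + 1) [] [] (Nat.le_succ _)]
  simp

theorem pvProc_cons (w : List Char) (ws : List (List Char)) :
    pvProc (w :: ws)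
      = (if w.all pvLowerPred then [pvCapitalize w] else []) ++ pvProc ws := by
  simp only [pvProc, List.filter_cons]
  split_ifs <;> simp

-- B's fused pass over l ++ [' '] produces exactly the processed pieces of the split of l
theorem pvBLoop_eq (l : List Char) : ∀ (buf : List Char) (ok : Bool) (res : List (List Char)),
    pvBLoop (l ++ [' ']) buf ok res
      = res ++ (if ok && (pvSplit1 l).1.all pvLowerPred
                then [pvCapitalize (buf ++ (pvSplit1 l).1)] else [])
            ++ pvProc (pvSplit1 l).2 := by
  induction l with
  | nil =>
      intro buf ok res
      simp only [List.nil_append, pvBLoop, reduceIte, pvSplit1, List.all_nil, Bool.and_true,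
        List.append_nil, pvProc, List.filter_nil, List.map_nil]
      cases ok <;> simp
  | cons c r ih =>
      intro buf ok res
      by_cases hc : c = ' '
      · subst hc
        simp only [List.cons_append, pvBLoop, reduceIte]
        rw [ih [] true]
        simp only [pvSplit1, reduceIte, Bool.true_and, List.nil_append]
        rw [pvProc_cons]
        cases ok <;> cases h1 : (pvSplit1 r).1.all pvLowerPred <;>
          simp [h1, List.append_assoc]
      · simp only [List.cons_append, pvBLoop, if_neg hc]
        rw [ih]
        simp only [pvSplit1, if_neg hc]
        have hall : (c :: (pvSplit1 r).1).all pvLowerPred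
            = ((decide ('a' ≤ c) && decide (c ≤ 'z')) && (pvSplit1 r).1.all pvLowerPred) := by
          rw [List.all_cons]; rfl
        have hbuf : buf ++ [c] ++ (pvSplit1 r).1 = buf ++ (c :: (pvSplit1 r).1) := by simp
        rw [hall, Bool.and_assoc, hbuf]

-- ===== VERDICT (by name: the statement is the Claim_ definition above) =====
theorem filter_eng_spec : Claim_equal_filter_eng := by
  intro s _
  unfold Spec_filter_eng filter_eng filter_eng_alt pvIntFunc
  simp only [PySem.List.foldl_append_if_eq_filter, List.nil_append]
  have hfix : (PySem.Chars.splitOn s.toList [' ']).filter pvCheckA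
      = (PySem.Chars.splitOn s.toList [' ']).filter (fun w => w.all pvLowerPred) := by
    apply List.filter_congr
    intro w _
    rw [pvCheckA_eq_all]
  rw [hfix, pvSplitOn_eq]
  rw [pvBLoop_eq s.toList [] true []]
  simp only [Bool.true_and, List.nil_append]
  rw [pvTitle_join _ (by
    intro w hw
    exact (List.mem_filter.mp hw).2)]
  rw [← pvProc_cons]
  rfl
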